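-- pv_equiv track=rewrite | github.com/scottiadamson/Mouse_ribosome_footprint_profiling_snakemake | scripts/obs_exp.py | codon_dict
-- ===== SOURCE A (Python) =====
-- def codon_dict(CDS_seq, offset):
--     pos_dict = {};codon_list = []
--     for i in range(0, int(len(CDS_seq)/3)):
--         this_codon = CDS_seq[i*3:i*3+3]
--         codon_list.append(this_codon)
--         for i in range(i*3,i*3+3):
--             pos_dict[i+offset] = this_codon
--     return pos_dict, codon_list
-- ===== SOURCE B (Python) =====
-- def codon_dict(CDS_seq, offset):
--     pos_dict = {}
--     codon_list = []
--     rest = CDS_seq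
--     pos = offset
--     while len(rest) >= 3:
--         codon, rest = rest[:3], rest[3:]
--         codon_list.append(codon)
--         pos_dict[pos] = codon
--         pos_dict[pos + 1] = codon
--         pos_dict[pos + 2] = codon
--         pos += 3
--     return pos_dict, codon_list
-- ===== Notes on version B (the rewrite author's own statement) =====
-- stated objective: alternative
-- what changed: A iterates codon indices computed from len//3 and slices the string by index with a nested inner position loop; B streams the string itself, repeatedly splitting off a 3-character prefix while keeping a running position counter -- no precomputed codon count, no index arithmetic, no inner loop; the trade-off is that each rest[3:] copies the tail, so B is quadratic in CPython.
import Mathlib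
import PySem

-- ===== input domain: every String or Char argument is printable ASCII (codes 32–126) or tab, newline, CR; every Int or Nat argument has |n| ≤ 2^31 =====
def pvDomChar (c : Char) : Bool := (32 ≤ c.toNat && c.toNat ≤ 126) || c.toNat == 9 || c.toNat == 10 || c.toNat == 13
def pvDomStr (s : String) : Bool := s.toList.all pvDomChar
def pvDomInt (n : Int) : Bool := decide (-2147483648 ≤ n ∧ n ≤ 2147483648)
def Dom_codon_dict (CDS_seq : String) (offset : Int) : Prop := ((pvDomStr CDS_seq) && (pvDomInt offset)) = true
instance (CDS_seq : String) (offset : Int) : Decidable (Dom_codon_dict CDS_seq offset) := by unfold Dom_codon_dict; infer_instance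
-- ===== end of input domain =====

-- B replaces A's index-driven loop (codon count from len//3, slicing by i*3) by a streaming pass
-- that repeatedly splits a 3-char prefix off the remaining string with a running position counter
-- (objective: alternative decomposition).

-- ===== PORT A =====
-- int(len(CDS_seq)/3) equals len(CDS_seq) // 3 here (length nonnegative, far below 2^53)
def codon_dict (CDS_seq : String) (offset : Int) : (List (Int × String)) × List String :=
  let st := (PySem.List.pyRange 0 (PySem.Int.floordiv (PySem.Str.len CDS_seq) 3)).foldl
    (fun (st : PySem.Dict Int String × List String) i =>
      let this_codon := PySem.Str.slice CDS_seq (some (i*3)) (some (i*3+3))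
      let codon_list := st.2 ++ [this_codon]
      let pos_dict := (PySem.List.pyRange (i*3) (i*3+3)).foldl
        (fun d j => d.insert (j + offset) this_codon) st.1
      (pos_dict, codon_list))
    (PySem.Dict.empty, [])
  (st.1.items, st.2)

-- ===== PORT B =====
-- 'while len(rest) >= 3: codon, rest = rest[:3], rest[3:]' is structural recursion on the char list
def codonStream (rest : List Char) (pos : Int) (d : PySem.Dict Int String) (cl : List String) :
    PySem.Dict Int String × List String :=
  match rest with
  | a :: b :: c :: rest' =>
      let codon := String.ofList [a, b, c]
      codonStream rest' (pos + 3)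
        (((d.insert pos codon).insert (pos + 1) codon).insert (pos + 2) codon)
        (cl ++ [codon])
  | _ => (d, cl)

def codon_dict_alt (CDS_seq : String) (offset : Int) : (List (Int × String)) × List String :=
  let st := codonStream CDS_seq.toList offset PySem.Dict.empty []
  (st.1.items, st.2)

-- ===== PRECONDITION & SPEC =====
def Spec_codon_dict (CDS_seq : String) (offset : Int) (out : (List (Int × String)) × List String) : Prop := out = codon_dict_alt CDS_seq offset
instance (CDS_seq : String) (offset : Int) (out : (List (Int × String)) × List String) : Decidable (Spec_codon_dict CDS_seq offset out) := by unfold Spec_codon_dict; infer_instance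

-- ===== CLAIM (what is proved, stated in full; the proofs are below) =====
def Claim_equal_codon_dict : Prop := ∀ (CDS_seq : String) (offset : Int), Dom_codon_dict CDS_seq offset → Spec_codon_dict CDS_seq offset (codon_dict CDS_seq offset)

-- ===== LEMMAS AND PROOFS =====

-- the stream loop stops as soon as fewer than three characters remain
theorem codonStream_short (rest : List Char) (pos : Int) (d : PySem.Dict Int String)
    (cl : List String) (h : rest.length < 3) : codonStream rest pos d cl = (d, cl) := by
  match rest with
  | [] => rfl
  | [_] => rfl
  | [_, _] => rfl
  | _ :: _ :: _ :: _ => simp at h; omega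

-- A's fold over codon indices j..n equals B's stream on the remaining characters
theorem codon_loop_eq (cs : List Char) (offset : Int) :
    ∀ (k j : Nat) (d : PySem.Dict Int String) (cl : List String),
    3 * (j + k) ≤ cs.length → cs.length < 3 * (j + k) + 3 →
    ((PySem.List.pyRange (j : Int) ((j : Int) + (k : Int)) 1).foldl
      (fun (st : PySem.Dict Int String × List String) i =>
        ((PySem.List.pyRange (i*3) (i*3+3) 1).foldl
            (fun d' j' => d'.insert (j' + offset)
              (String.ofList (PySem.List.slice cs (some (i*3)) (some (i*3+3))))) st.1,
         st.2 ++ [String.ofList (PySem.List.slice cs (some (i*3)) (some (i*3+3)))]))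
      (d, cl))
    = codonStream (cs.drop (3 * j)) ((j : Int) * 3 + offset) d cl := by
  intro k
  induction k with
  | zero =>
      intro j d cl h1 h2
      rw [PySem.List.pyRange_one_eq_nil (by omega)]
      rw [codonStream_short _ _ _ _ (by simp [List.length_drop]; omega)]
      rfl
  | succ k ih =>
      intro j d cl h1 h2
      have hdrop : 3 * j < cs.length := by omega
      -- decompose the suffix into its first three characters
      obtain ⟨a, b, c, rest', hsuf⟩ :
          ∃ a b c rest', cs.drop (3 * j) = a :: b :: c :: rest' := by
        have hlen : 3 ≤ (cs.drop (3 * j)).length := by simp [List.length_drop]; omega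
        match hm : cs.drop (3 * j) with
        | [] => rw [hm] at hlen; simp at hlen
        | [x] => rw [hm] at hlen; simp at hlen
        | [x, y] => rw [hm] at hlen; simp at hlen
        | x :: y :: z :: r => exact ⟨x, y, z, r, rfl⟩
      have hslice : PySem.List.slice cs (some ((j:Int)*3)) (some ((j:Int)*3+3))
          = [a, b, c] := by
        rw [PySem.List.slice_toNat cs (by positivity) (by positivity)]
        have e1 : ((j:Int)*3).toNat = 3*j := by omega
        have e2 : ((j:Int)*3+3).toNat = 3*j+3 := by omega
        rw [e1, e2, hsuf]
        simp
      have hrest : cs.drop (3 * (j + 1)) = rest' := by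
        have h33 : cs.drop (3 * (j+1)) = (cs.drop (3*j)).drop 3 := by
          rw [List.drop_drop]; ring_nf
        rw [h33, hsuf]; rfl
      rw [show ((j:Int) + ((k+1 : Nat) : Int)) = ((j+1:Nat) : Int) + (k:Int) by push_cast; ring]
      rw [PySem.List.pyRange_one_cons (by push_cast; omega), List.foldl_cons]
      -- evaluate the inner position range: [j*3, j*3+1, j*3+2]
      rw [PySem.List.pyRange_one_cons (by omega), PySem.List.pyRange_one_cons (by omega),
        PySem.List.pyRange_one_cons (by omega), PySem.List.pyRange_one_eq_nil (by omega)]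
      simp only [List.foldl_cons, List.foldl_nil]
      rw [hslice]
      set pos := (j:Int)*3 + offset with hpos
      have e1 : (j:Int)*3 + 1 + offset = pos + 1 := by rw [hpos]; ring
      have e2 : (j:Int)*3 + 1 + 1 + offset = pos + 2 := by rw [hpos]; ring
      have e3 : ((j+1:Nat) : Int)*3 + offset = pos + 3 := by rw [hpos]; push_cast; ring
      rw [e1, e2]
      rw [show ((j:Int) + 1) = ((j+1:Nat) : Int) by push_cast; ring]
      rw [ih (j+1) _ _ (by omega) (by omega)]
      rw [hrest, e3, hsuf]
      conv_rhs => rw [codonStream]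

-- ===== VERDICT (by name: the statement is the Claim_ definition above) =====
theorem codon_dict_spec : Claim_equal_codon_dict := by
  intro s offset _
  unfold Spec_codon_dict codon_dict codon_dict_alt
  have hlen : PySem.Int.floordiv (PySem.Str.len s) 3 = ((s.length / 3 : Nat) : Int) := by
    simp
  rw [hlen]
  have hsl : ∀ i : Int, PySem.Str.slice s (some (i*3)) (some (i*3+3))
      = String.ofList (PySem.List.slice s.toList (some (i*3)) (some (i*3+3))) := by
    intro i; simp [PySem.Str.slice]
  have h0 : ((0:Nat) : Int) = 0 := rfl
  have hL : s.toList.length = s.length := by simp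
  have := codon_loop_eq s.toList offset (s.length / 3) 0 PySem.Dict.empty []
    (by rw [hL]; omega) (by rw [hL]; omega)
  simp only [Nat.cast_zero, zero_add, Nat.mul_zero, List.drop_zero, zero_mul] at this
  simp only [hsl]
  rw [this]
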